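-- pv_equiv track=rewrite | github.com/MinKyeom/KMK-DREAM | Programmers/lv3/표 병합.py | unmerge
-- ===== SOURCE A (Python) =====
-- from collections import deque
--
-- def unmerge(m, check, s, fir):
--     r = fir[0]
--     c = fir[1]
--     check = deque(check)
--     n = len(check)
--     count = 0
--
--     while count < n:
--         i = check.popleft()
--
--         if [r, c] in i:
--             for v, w in i:
--                 m[v][w] = "EMPTY"
--
--             m[r][c] = s
--             break
--
--         check.append(i)
--
--         count += 1
--
--     m[r][c] = s
--
--     return m, list(check)
-- ===== SOURCE B (Python) =====
-- def unmerge(m, check, s, fir):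
--     r, c = fir[0], fir[1]
--     # Build an inverted index cell -> index of first group holding it, in one pass,
--     # then answer the query by a single dict lookup (no per-group membership scan).
--     owner = {}
--     for j, g in enumerate(check):
--         for cell in g:
--             owner.setdefault(tuple(cell), j)
--     k = owner.get((r, c))
--     if k is None:
--         rest = list(check)
--     else:
--         for v, w in check[k]:
--             m[v][w] = "EMPTY"
--         rest = check[k + 1:] + check[:k]
--     m[r][c] = s
--     return m, rest
-- ===== Notes on version B (the rewrite author's own statement) =====
-- stated objective: alternative
-- what changed: Replaces A's counted deque popleft/append rotation loop and its per-group membership test [r,c] in g with an inverted index: one pass builds a dict mapping each cell tuple to the index of the first group containing it, the query becomes a single dict lookup, and the remainder is reconstructed by slicing check[k+1:]+check[:k].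
import Mathlib
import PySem

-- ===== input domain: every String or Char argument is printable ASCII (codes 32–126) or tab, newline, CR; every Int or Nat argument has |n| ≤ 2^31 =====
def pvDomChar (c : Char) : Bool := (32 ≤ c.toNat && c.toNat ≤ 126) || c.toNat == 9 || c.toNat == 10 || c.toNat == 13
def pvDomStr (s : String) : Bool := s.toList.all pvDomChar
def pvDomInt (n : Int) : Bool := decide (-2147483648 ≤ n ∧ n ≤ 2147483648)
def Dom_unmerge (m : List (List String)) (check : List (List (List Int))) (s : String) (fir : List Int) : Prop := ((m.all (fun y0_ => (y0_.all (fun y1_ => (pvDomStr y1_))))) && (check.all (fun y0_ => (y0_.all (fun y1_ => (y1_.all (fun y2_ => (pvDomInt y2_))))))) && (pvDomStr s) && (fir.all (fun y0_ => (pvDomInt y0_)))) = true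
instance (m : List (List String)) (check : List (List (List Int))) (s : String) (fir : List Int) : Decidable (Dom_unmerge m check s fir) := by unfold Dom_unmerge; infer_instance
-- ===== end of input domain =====

-- B replaces A's counted deque popleft/append rotation loop (with its per-group membership
-- test) by an inverted index built in one pass — a dict from each cell to the index of the
-- first group holding it — so the search becomes one dict lookup (objective: alternative).
-- A mutates its argument m in place; the equivalence proved here is about the RETURN value only.

-- ===== PORT A =====
-- m[v][w] = x  (shared primitive assignment, used by both Pythons' `m[..][..] = ..` statements)
def setCell (m : List (List String)) (v w : Int) (x : String) : List (List String) :=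
  PySem.List.pySetD m v (PySem.List.pySetD (PySem.List.pyGetD m v []) w x)

-- `for v, w in g: m[v][w] = "EMPTY"`  (the same loop appears verbatim in A and in B)
def emptyGroup (m : List (List String)) (g : List (List Int)) : List (List String) :=
  g.foldl (fun mm cell => setCell mm (PySem.List.pyGetD cell 0 0) (PySem.List.pyGetD cell 1 0) "EMPTY") m

-- A's `while count < n` over the deque: pop front; on match empty the group, set m[r][c]=s, break;
-- otherwise push the group to the back and continue.  fuel = n = initial length of the deque.
def unmergeLoopA (r c : Int) (s : String) (m : List (List String)) (dq : List (List (List Int))) : Nat → List (List String) × List (List (List Int))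
  | 0 => (m, dq)
  | fuel + 1 =>
    match dq with
    | [] => (m, [])
    | i :: rest =>
      if [r, c] ∈ i then (setCell (emptyGroup m i) r c s, rest)
      else unmergeLoopA r c s m (rest ++ [i]) fuel

def unmerge (m : List (List String)) (check : List (List (List Int))) (s : String) (fir : List Int) : List (List String) × List (List (List Int)) :=
  let r := PySem.List.pyGetD fir 0 0
  let c := PySem.List.pyGetD fir 1 0
  let res := unmergeLoopA r c s m check check.length
  (setCell res.1 r c s, res.2)

-- ===== PORT B =====
-- `owner = {}; for j, g in enumerate(check): for cell in g: owner.setdefault(tuple(cell), j)`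
def buildOwner (check : List (List (List Int))) : PySem.Dict (List Int) Int :=
  (PySem.List.enumerate check 0).foldl
    (fun d jg => jg.2.foldl (fun d cell => d.setdefault cell jg.1) d)
    PySem.Dict.empty

def unmerge_alt (m : List (List String)) (check : List (List (List Int))) (s : String) (fir : List Int) : List (List String) × List (List (List Int)) :=
  let r := PySem.List.pyGetD fir 0 0
  let c := PySem.List.pyGetD fir 1 0
  let owner := buildOwner check
  match owner.get? [r, c] with
  | none => (setCell m r c s, check)
  | some k =>
      let m' := emptyGroup m (PySem.List.pyGetD check k [])
      (setCell m' r c s,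
       PySem.List.slice check (some (k + 1)) none ++ PySem.List.slice check none (some k))

-- ===== PRECONDITION & SPEC =====
-- Pre_ excludes exactly the inputs where the Python A raises: fir shorter than 2 (IndexError on
-- fir[0]/fir[1]), the assignment m[r][c] = s out of range (IndexError), or — in the first group
-- containing [r, c] — a cell that is not an in-range pair (ValueError/IndexError on the for-unpack
-- or on m[v][w] = "EMPTY").
def Pre_unmerge (m : List (List String)) (check : List (List (List Int))) (s : String) (fir : List Int) : Prop :=
  2 ≤ fir.length ∧
  (let r := fir.getD 0 0
   let c := fir.getD 1 0
   (PySem.Raise.InRange m.length r ∧ PySem.Raise.InRange (PySem.List.pyGetD m r []).length c) ∧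
   ∀ g ∈ check, [r, c] ∈ g →
     ∀ cell ∈ g, cell.length = 2 ∧
       PySem.Raise.InRange m.length (cell.getD 0 0) ∧
       PySem.Raise.InRange (PySem.List.pyGetD m (cell.getD 0 0) []).length (cell.getD 1 0))
instance (m : List (List String)) (check : List (List (List Int))) (s : String) (fir : List Int) : Decidable (Pre_unmerge m check s fir) := by unfold Pre_unmerge; infer_instance

def pvWitness_unmerge : List (List String) × List (List (List Int)) × String × List Int :=
  ([["a", "b"], ["c", "d"]], [[[0, 0], [0, 1]], [[1, 1]]], "X", [0, 1])

def Spec_unmerge (m : List (List String)) (check : List (List (List Int))) (s : String) (fir : List Int) (out : List (List String) × List (List (List Int))) : Prop := out = unmerge_alt m check s fir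
instance (m : List (List String)) (check : List (List (List Int))) (s : String) (fir : List Int) (out : List (List String) × List (List (List Int))) : Decidable (Spec_unmerge m check s fir out) := by unfold Spec_unmerge; infer_instance

-- ===== CLAIM (what is proved, stated in full; the proofs are below) =====
def Claim_equal_unmerge : Prop := ∀ (m : List (List String)) (check : List (List (List Int))) (s : String) (fir : List Int), Dom_unmerge m check s fir → Pre_unmerge m check s fir → Spec_unmerge m check s fir (unmerge m check s fir)

-- ===== LEMMAS AND PROOFS =====

-- proof-side characterisation: index of the first group containing key
def findGroupIdx (key : List Int) : List (List (List Int)) → Option Nat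
  | [] => none
  | g :: gs => if key ∈ g then some 0 else (findGroupIdx key gs).map (· + 1)

lemma pyIdx_lt (n : Nat) (i : Int) (k : Nat) (h : PySem.List.pyIdx? n i = some k) : k < n := by
  unfold PySem.List.pyIdx? at h; split_ifs at h <;> simp_all <;> omega

lemma pySetD_idem {α : Type} (xs : List α) (i : Int) (v : α) :
    PySem.List.pySetD (PySem.List.pySetD xs i v) i v = PySem.List.pySetD xs i v := by
  unfold PySem.List.pySetD PySem.List.pySet?
  rcases h : PySem.List.pyIdx? xs.length i with _ | k
  · simp [h]
  · simp [h, List.length_set, List.set_set]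

lemma pyGetD_pySetD_self {α : Type} (xs : List α) (i : Int) (v d : α) (k : Nat)
    (h : PySem.List.pyIdx? xs.length i = some k) :
    PySem.List.pyGetD (PySem.List.pySetD xs i v) i d = v := by
  unfold PySem.List.pyGetD PySem.List.pyGet? PySem.List.pySetD PySem.List.pySet?
  simp [h, List.length_set, pyIdx_lt _ _ _ h]

lemma setCell_idem (m : List (List String)) (r c : Int) (s : String) :
    setCell (setCell m r c s) r c s = setCell m r c s := by
  unfold setCell
  rcases h : PySem.List.pyIdx? m.length r with _ | k
  · have hnone : ∀ (row : List String), PySem.List.pySetD m r row = m := fun row => by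
      simp [PySem.List.pySetD, PySem.List.pySet?, h]
    simp [hnone]
  · rw [pyGetD_pySetD_self m r _ [] k h, pySetD_idem, pySetD_idem]

-- the setdefault fold over one group's cells, observed through get?
lemma foldSetdefault_get (key : List Int) (v : Int) :
    ∀ (g : List (List Int)) (d : PySem.Dict (List Int) Int),
      (g.foldl (fun d cell => d.setdefault cell v) d).get? key =
        if key ∈ g then some ((d.get? key).getD v) else d.get? key := by
  intro g
  induction g with
  | nil => intro d; simp
  | cons cel g ih =>
    intro d
    simp only [List.foldl_cons, ih, List.mem_cons]
    by_cases hc : key = cel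
    · subst hc
      rw [PySem.Dict.get?_setdefault_self]
      by_cases hg : key ∈ g <;> simp [hg]
    · rw [PySem.Dict.get?_setdefault_of_ne d v hc]
      by_cases hg : key ∈ g <;> simp [hg, hc]

-- the whole index build, observed through get?: first group (from start s) containing key
lemma buildOwner_get (key : List Int) :
    ∀ (gs : List (List (List Int))) (s : Int) (d : PySem.Dict (List Int) Int),
      ((PySem.List.enumerate gs s).foldl
          (fun d jg => jg.2.foldl (fun d cell => d.setdefault cell jg.1) d) d).get? key =
        match d.get? key with
        | some x => some x
        | none => (findGroupIdx key gs).map (fun k => s + (k : Int)) := by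
  intro gs
  induction gs with
  | nil =>
    intro s d
    simp only [PySem.List.enumerate_nil, List.foldl_nil, findGroupIdx]
    rcases d.get? key with _ | x <;> simp
  | cons g gs ih =>
    intro s d
    rw [PySem.List.enumerate_cons]
    simp only [List.foldl_cons]
    rw [ih (s + 1), foldSetdefault_get]
    by_cases hg : key ∈ g
    · simp only [hg, if_pos, findGroupIdx]
      rcases d.get? key with _ | x <;> simp
    · simp only [hg, findGroupIdx, ite_false]
      rcases d.get? key with _ | x
      · rcases findGroupIdx key gs with _ | k
        · simp
        · simp; ring
      · simp
  
lemma pyGetD_natCast_getD {α : Type} (xs : List α) (n : Nat) (d : α) :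
    PySem.List.pyGetD xs (n : Int) d = xs.getD n d := by
  unfold PySem.List.pyGetD PySem.List.pyGet? PySem.List.pyIdx?
  by_cases h : n < xs.length
  · simp [h, List.getD_eq_getElem?_getD]
  · simp [h, List.getD_eq_getElem?_getD]

-- the rotation invariant of A's loop: after processing `post` with `pre` already rotated behind it
lemma loopA_rot (r c : Int) (s : String) (m : List (List String)) :
    ∀ (post pre : List (List (List Int))),
      unmergeLoopA r c s m (post ++ pre) post.length =
        match findGroupIdx [r, c] post with
        | none => (m, pre ++ post)
        | some k => (setCell (emptyGroup m (PySem.List.pyGetD post (k : Int) [])) r c s,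
                     post.drop (k + 1) ++ pre ++ post.take k) := by
  intro post
  induction post with
  | nil => intro pre; simp [findGroupIdx, unmergeLoopA]
  | cons g gs ih =>
    intro pre
    by_cases h : [r, c] ∈ g
    · simp only [findGroupIdx, if_pos h]
      simp [unmergeLoopA, h]
    · have step : unmergeLoopA r c s m ((g :: gs) ++ pre) (g :: gs).length
          = unmergeLoopA r c s m (gs ++ (pre ++ [g])) gs.length := by
        simp [unmergeLoopA, h]
      rw [step, ih (pre ++ [g])]
      simp only [findGroupIdx, if_neg h]
      rcases hf : findGroupIdx [r, c] gs with _ | k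
      · simp
      · simp only [Option.map_some]
        have hidx : PySem.List.pyGetD (g :: gs) ((k + 1 : Nat) : Int) [] = PySem.List.pyGetD gs (k : Int) [] := by
          rw [pyGetD_natCast_getD, pyGetD_natCast_getD]; simp [List.getD]
        rw [hidx]
        simp [List.take_succ_cons, List.drop_succ_cons]

lemma slice_from_succ (check : List (List (List Int))) (k : Nat) :
    PySem.List.slice check (some ((k : Int) + 1)) none = check.drop (k + 1) := by
  rw [show ((k : Int) + 1) = ((k + 1 : Nat) : Int) by push_cast; ring]
  exact PySem.List.slice_from_natCast check (k + 1)

-- ===== VERDICT (by name: the statement is the Claim_ definition above) =====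
theorem unmerge_spec : Claim_equal_unmerge := by
  intro m check s fir _ _
  unfold Spec_unmerge unmerge unmerge_alt buildOwner
  dsimp only
  have hB := buildOwner_get [PySem.List.pyGetD fir 0 0, PySem.List.pyGetD fir 1 0] check 0 PySem.Dict.empty
  rw [PySem.Dict.get?_empty] at hB
  rw [hB]
  have hA := loopA_rot (PySem.List.pyGetD fir 0 0) (PySem.List.pyGetD fir 1 0) s m check []
  simp only [List.append_nil, List.nil_append] at hA
  rw [hA]
  rcases hf : findGroupIdx [PySem.List.pyGetD fir 0 0, PySem.List.pyGetD fir 1 0] check with _ | k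
  · simp
  · have h1 := slice_from_succ check k
    have h2 := PySem.List.slice_to_natCast check k
    simp [h1, h2, setCell_idem]
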